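-- pv_equiv track=rewrite | github.com/w3c/ift-client-tests | generators/testCaseGeneratorLib/helpers.py | id32_no_strip
-- ===== SOURCE A (Python) =====
-- def id32_no_strip(entry_id_int):
--     """
--     Encode an integer as base32hex WITHOUT stripping leading zero bytes.
--
--     The spec (conform-entry-id-must-be-converted) requires leading zeros to be
--     stripped. This helper deliberately omits that step, producing the 'wrong'
--     encoding used in negative tests that verify clients strip leading zeros.
--     Example: integer 1 -> big-endian [0x00, 0x00, 0x00, 0x01] -> '0000008'
--              (correct encoding strips to [0x01] -> '04')
--     """
--     # Always use 4 bytes (big-endian 32-bit), no stripping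
--     b = entry_id_int.to_bytes(4, 'big')
--     alphabet = '0123456789ABCDEFGHIJKLMNOPQRSTUV'
--     result = ''
--     bits = 0
--     num_bits = 0
--     for byte in b:
--         bits = (bits << 8) | byte
--         num_bits += 8
--         while num_bits >= 5:
--             num_bits -= 5
--             result += alphabet[(bits >> num_bits) & 0x1F]
--     if num_bits > 0:
--         result += alphabet[(bits << (5 - num_bits)) & 0x1F]
--     return result
-- ===== SOURCE B (Python) =====
-- def id32_no_strip(entry_id_int):
--     # Direct positional extraction: pad the 32 bits with 3 zero bits (35 = 7*5)
--     # and read off the seven base32hex digits by shifting, no streaming accumulator.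
--     b = entry_id_int.to_bytes(4, 'big')  # keeps the OverflowError for out-of-range ints
--     value = int.from_bytes(b, 'big') << 3
--     alphabet = '0123456789ABCDEFGHIJKLMNOPQRSTUV'
--     return ''.join(alphabet[(value >> (5 * i)) & 0x1F] for i in range(6, -1, -1))
-- ===== Notes on version B (the rewrite author's own statement) =====
-- stated objective: simpler
-- what changed: Replaced the streaming bit-accumulator with its inner while-loop by direct positional extraction: shift the 32-bit value left by 3 and read the seven 5-bit base32hex digits off by shifts and masks.
import Mathlib
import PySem

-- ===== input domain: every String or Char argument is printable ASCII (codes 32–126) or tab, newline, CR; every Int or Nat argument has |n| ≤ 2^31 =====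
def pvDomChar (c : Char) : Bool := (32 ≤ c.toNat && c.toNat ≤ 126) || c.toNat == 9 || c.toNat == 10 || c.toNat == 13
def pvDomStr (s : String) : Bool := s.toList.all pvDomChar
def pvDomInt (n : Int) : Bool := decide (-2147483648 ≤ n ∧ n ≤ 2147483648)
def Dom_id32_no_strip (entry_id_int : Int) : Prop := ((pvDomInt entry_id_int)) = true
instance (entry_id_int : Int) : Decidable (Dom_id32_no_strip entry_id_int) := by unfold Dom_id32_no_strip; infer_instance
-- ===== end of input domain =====

-- B replaces A's streaming bit-accumulator (inner while-loop) by direct positional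
-- extraction of the seven 5-bit base32hex digits from the 3-bit-padded 32-bit value (objective: simpler).


-- ===== PORT A =====
def pvAlphaA : List Char := "0123456789ABCDEFGHIJKLMNOPQRSTUV".toList

-- the inner 'while num_bits >= 5' loop of A (bits is unchanged by the loop)
def pvEmitA (bits : Nat) (numBits : Nat) (result : List Char) : Nat × List Char :=
  if h : 5 ≤ numBits then
    pvEmitA bits (numBits - 5) (result ++ [pvAlphaA.getD ((bits >>> (numBits - 5)) &&& 31) '0'])
  else (numBits, result)
termination_by numBits
decreasing_by omega

def id32_no_strip (entry_id_int : Int) : String :=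
  -- entry_id_int.to_bytes(4, 'big'): the four big-endian bytes; Pre_ excludes exactly the
  -- inputs where Python raises OverflowError (negative or ≥ 2^32)
  let m := entry_id_int.toNat
  let b : List Nat := [(m >>> 24) &&& 255, (m >>> 16) &&& 255, (m >>> 8) &&& 255, m &&& 255]
  let st := b.foldl (fun (s : Nat × Nat × List Char) byte =>
    let bits := (s.1 <<< 8) ||| byte
    let r := pvEmitA bits (s.2.1 + 8) s.2.2
    (bits, r.1, r.2)) (0, 0, ([] : List Char))
  let res := if 0 < st.2.1 then st.2.2 ++ [pvAlphaA.getD ((st.1 <<< (5 - st.2.1)) &&& 31) '0'] else st.2.2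
  String.mk res

-- ===== PORT B =====
def pvAlphaB : List Char := "0123456789ABCDEFGHIJKLMNOPQRSTUV".toList

def id32_no_strip_alt (entry_id_int : Int) : String :=
  -- int.from_bytes(entry_id_int.to_bytes(4,'big'), 'big') = entry_id_int on the non-raising domain (Pre_)
  let value := entry_id_int.toNat <<< 3
  String.mk ((PySem.List.pyRange 6 (-1) (-1)).map
    (fun i => pvAlphaB.getD ((value >>> (5 * i).toNat) &&& 31) '0'))

-- ===== PRECONDITION & SPEC =====
-- Pre_ excludes exactly the inputs where A's to_bytes(4,'big') raises OverflowError.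
def Pre_id32_no_strip (entry_id_int : Int) : Prop :=
  0 ≤ entry_id_int ∧ entry_id_int < 4294967296
instance (entry_id_int : Int) : Decidable (Pre_id32_no_strip entry_id_int) := by
  unfold Pre_id32_no_strip; infer_instance
def pvWitness_id32_no_strip : Int := (1)

def Spec_id32_no_strip (entry_id_int : Int) (out : String) : Prop := out = id32_no_strip_alt entry_id_int
instance (entry_id_int : Int) (out : String) : Decidable (Spec_id32_no_strip entry_id_int out) := by unfold Spec_id32_no_strip; infer_instance

-- ===== CLAIM (what is proved, stated in full; the proofs are below) =====
def Claim_equal_id32_no_strip : Prop := ∀ (entry_id_int : Int), Dom_id32_no_strip entry_id_int → Pre_id32_no_strip entry_id_int → Spec_id32_no_strip entry_id_int (id32_no_strip entry_id_int)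

-- ===== LEMMAS AND PROOFS =====

theorem pvEmitA_8 (b : Nat) (r : List Char) :
    pvEmitA b 8 r = (3, r ++ [pvAlphaA.getD ((b >>> 3) &&& 31) '0']) := by
  rw [pvEmitA]; norm_num; rw [pvEmitA]; norm_num

theorem pvEmitA_11 (b : Nat) (r : List Char) :
    pvEmitA b 11 r = (1, r ++ [pvAlphaA.getD ((b >>> 6) &&& 31) '0', pvAlphaA.getD ((b >>> 1) &&& 31) '0']) := by
  rw [pvEmitA]; norm_num; rw [pvEmitA]; norm_num; rw [pvEmitA]; norm_num

theorem pvEmitA_9 (b : Nat) (r : List Char) :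
    pvEmitA b 9 r = (4, r ++ [pvAlphaA.getD ((b >>> 4) &&& 31) '0']) := by
  rw [pvEmitA]; norm_num; rw [pvEmitA]; norm_num

theorem pvEmitA_12 (b : Nat) (r : List Char) :
    pvEmitA b 12 r = (2, r ++ [pvAlphaA.getD ((b >>> 7) &&& 31) '0', pvAlphaA.getD ((b >>> 2) &&& 31) '0']) := by
  rw [pvEmitA]; norm_num; rw [pvEmitA]; norm_num; rw [pvEmitA]; norm_num

theorem pv_and31 (x : Nat) : x &&& 31 = x % 32 := by
  have := Nat.and_two_pow_sub_one_eq_mod x 5; norm_num at this; omega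

theorem pv_and255 (x : Nat) : x &&& 255 = x % 256 := by
  have := Nat.and_two_pow_sub_one_eq_mod x 8; norm_num at this; omega

theorem pv_testBit_mul256_add (x y : Nat) (h : y < 256) (i : Nat) :
    (x * 256 + y).testBit i = if i < 8 then y.testBit i else x.testBit (i - 8) := by
  by_cases hi : i < 8
  · simp only [hi, if_true]
    interval_cases i <;> simp [Nat.testBit_eq_decide_div_mod_eq] <;> omega
  · simp only [hi, if_false]
    obtain ⟨j, rfl⟩ : ∃ j, i = 8 + j := ⟨i - 8, by omega⟩
    have h8 : (x * 256 + y) >>> 8 = x := by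
      rw [Nat.shiftRight_eq_div_pow]; omega
    rw [← Nat.testBit_shiftRight, h8]
    congr 1; omega

theorem pv_lor_mul256 (x y : Nat) (h : y < 256) : (x <<< 8) ||| y = x * 256 + y := by
  apply Nat.eq_of_testBit_eq; intro i
  rw [pv_testBit_mul256_add x y h i]
  simp only [Nat.testBit_lor, Nat.testBit_shiftLeft]
  by_cases hi : i < 8
  · simp [hi, Nat.not_le.mpr hi]
  · have hle : 8 ≤ i := Nat.le_of_not_lt hi
    have h2 : (256:Nat) ≤ 2 ^ i := by
      calc (256:Nat) = 2 ^ 8 := rfl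
        _ ≤ 2 ^ i := Nat.pow_le_pow_right (by norm_num) hle
    have hy : y.testBit i = false := Nat.testBit_eq_false_of_lt (lt_of_lt_of_le h h2)
    simp [hi, hle, hy]

-- ===== VERDICT (by name: the statement is the Claim_ definition above) =====
theorem id32_no_strip_spec : Claim_equal_id32_no_strip := by
  intro n _ _
  unfold Spec_id32_no_strip id32_no_strip id32_no_strip_alt
  have hr : PySem.List.pyRange 6 (-1) (-1) = [6, 5, 4, 3, 2, 1, 0] := by decide
  rw [hr]
  have hab : pvAlphaB = pvAlphaA := rfl
  rw [hab]
  simp only [List.foldl, List.map]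
  norm_num [pvEmitA_8, pvEmitA_11, pvEmitA_9, pvEmitA_12]
  simp only [show Int.toNat 30 = 30 from rfl, show Int.toNat 25 = 25 from rfl, show Int.toNat 20 = 20 from rfl, show Int.toNat 15 = 15 from rfl, show Int.toNat 10 = 10 from rfl, show Int.toNat 5 = 5 from rfl]
  refine congrArg String.mk ?_
  generalize n.toNat = m
  norm_num
  have h1 : (m >>> 16) &&& 255 < 256 := by rw [pv_and255]; omega
  have h2 : (m >>> 8) &&& 255 < 256 := by rw [pv_and255]; omega
  have h3 : m &&& 255 < 256 := by rw [pv_and255]; omega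
  simp only [pv_lor_mul256 _ _ h1, pv_lor_mul256 _ _ h2, pv_lor_mul256 _ _ h3]
  refine ⟨?_, ?_, ?_, ?_, ?_, ?_, ?_⟩ <;>
    · congr 1
      simp only [pv_and255, pv_and31, Nat.shiftLeft_eq, Nat.shiftRight_eq_div_pow]
      norm_num
      congr 1
      omega
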